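-- pv_equiv track=rewrite | github.com/vallmeister/Programming | src/leetcode/2931_maximum_spending_after_buying_items.py | maxSpending
-- ===== SOURCE A (Python) =====
-- from heapq import heappush, heappop
-- from typing import List
--
-- def maxSpending(values: List[List[int]]) -> int:
--     m = len(values)
--     n = len(values[0])
--     heap = []
--     ans = 0
--     for i in range(m):
--         heappush(heap, (values[i][n - 1], i, n - 1))
--     for d in range(1, m * n + 1):
--         v, i, j = heappop(heap)
--         ans += d * v
--         if j > 0:
--             heappush(heap, (values[i][j - 1], i, j - 1))
--     return ans
-- ===== SOURCE B (Python) =====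
-- def maxSpending(values):
--     m = len(values)
--     n = len(values[0])
--     ptr = [n - 1] * m
--     ans = 0
--     for d in range(1, m * n + 1):
--         best = None
--         for i in range(m):
--             if ptr[i] >= 0 and (best is None or values[i][ptr[i]] < values[best][ptr[best]]):
--                 best = i
--         ans += d * values[best][ptr[best]]
--         ptr[best] -= 1
--     return ans
-- ===== Notes on version B (the rewrite author's own statement) =====
-- stated objective: alternative
-- what changed: Replaces A's heapq-based k-way merge (heap of one frontier triple per row) by a plain pointer array with a linear arg-min scan over the row frontiers each round; no heap or ordering structure is maintained.
import Mathlib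
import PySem

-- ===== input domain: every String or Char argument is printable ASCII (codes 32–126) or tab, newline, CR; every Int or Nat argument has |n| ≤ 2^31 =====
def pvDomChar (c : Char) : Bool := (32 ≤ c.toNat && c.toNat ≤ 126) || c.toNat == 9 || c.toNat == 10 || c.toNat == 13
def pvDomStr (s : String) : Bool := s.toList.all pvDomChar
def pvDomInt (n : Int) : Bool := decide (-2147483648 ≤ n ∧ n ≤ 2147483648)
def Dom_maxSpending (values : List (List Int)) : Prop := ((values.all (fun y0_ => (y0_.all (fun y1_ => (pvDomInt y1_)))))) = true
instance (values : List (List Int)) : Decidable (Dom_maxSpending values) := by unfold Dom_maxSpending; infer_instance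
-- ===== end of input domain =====

-- B replaces A's heapq k-way merge by a plain pointer array with a linear arg-min scan per step
-- (no heap structure at all): alternative algorithm, same results; A mutates nothing observable.

-- ===== PORT A =====
-- xs[i][j] with Python index semantics (shared indexing helper; total form, defaults only hit outside Pre_)
def getVal (values : List (List Int)) (i j : Int) : Int :=
  (PySem.List.pyGet? ((PySem.List.pyGet? values i).getD []) j).getD 0

-- heappush into / heappop from a heap of distinct triples = insert into / pop head of a
-- lexicographically ascending sorted list (exact: heapq pops its elements in ascending tuple order,
-- and the triples (v, i, j) in A's heap are pairwise distinct since row index i occurs at most once)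
def pvTltB (x y : Int × Int × Int) : Bool :=
  decide (x.1 < y.1 ∨ (x.1 = y.1 ∧ (x.2.1 < y.2.1 ∨ (x.2.1 = y.2.1 ∧ x.2.2 < y.2.2))))

def aInsert (x : Int × Int × Int) : List (Int × Int × Int) → List (Int × Int × Int)
  | [] => [x]
  | y :: ys => if pvTltB x y then x :: y :: ys else y :: aInsert x ys

-- the body of A's second loop: pop the min triple, add d*v, push the row's next element if any
def aStep (values : List (List Int)) (st : List (Int × Int × Int) × Int) (d : Int) :
    List (Int × Int × Int) × Int :=
  match st.1 with
  | [] => st  -- heappop of an empty heap raises in Python; unreachable under Pre_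
  | (v, i, j) :: rest =>
    let ans := st.2 + d * v
    let rest := if j > 0 then aInsert (getVal values i (j - 1), i, j - 1) rest else rest
    (rest, ans)

def maxSpending (values : List (List Int)) : Int :=
  let m : Int := values.length
  let n : Int := (((PySem.List.pyGet? values 0).getD []).length : Int)
  let heap : List (Int × Int × Int) :=
    (PySem.List.pyRange 0 m 1).foldl (fun h i => aInsert (getVal values i (n - 1), i, n - 1) h) []
  ((PySem.List.pyRange 1 (m * n + 1) 1).foldl (aStep values) (heap, 0)).2

-- ===== PORT B =====
-- B's inner loop: first index i with ptr[i] >= 0 whose frontier value is a strict minimum so far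
def bestIdx (values : List (List Int)) (ptr : List Int) (m : Int) : Option Int :=
  (PySem.List.pyRange 0 m 1).foldl
    (fun best i =>
      if (decide (0 ≤ PySem.List.pyGetD ptr i 0) &&
          (match best with
           | none => true
           | some b => decide (getVal values i (PySem.List.pyGetD ptr i 0) <
                               getVal values b (PySem.List.pyGetD ptr b 0)))) = true
      then some i else best)
    none

-- the body of B's outer loop: take the arg-min frontier element, add d*value, move its pointer left
def bStep (values : List (List Int)) (m : Int) (st : List Int × Int) (d : Int) : List Int × Int :=
  match bestIdx values st.1 m with
  | none => st  -- values[None][...] raises in Python; unreachable under Pre_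
  | some b =>
    let ans := st.2 + d * getVal values b (PySem.List.pyGetD st.1 b 0)
    (PySem.List.pySetD st.1 b (PySem.List.pyGetD st.1 b 0 - 1), ans)

def maxSpending_alt (values : List (List Int)) : Int :=
  let m : Int := values.length
  let n : Int := (((PySem.List.pyGet? values 0).getD []).length : Int)
  let ptr : List Int := PySem.List.pyRepeat [n - 1] m
  ((PySem.List.pyRange 1 (m * n + 1) 1).foldl (bStep values m) (ptr, 0)).2

-- ===== PRECONDITION & SPEC =====
-- Pre_ excludes exactly the inputs where the Python A raises IndexError: empty `values`,
-- an empty first row (n = 0, so values[i][-1] is evaluated on row 0), or some row shorter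
-- than the first row (values[i][n-1] out of range). A returns normally on everything else.
def Pre_maxSpending (values : List (List Int)) : Prop :=
  values ≠ [] ∧ 0 < (values.headD []).length ∧ ∀ r ∈ values, (values.headD []).length ≤ r.length
instance (values : List (List Int)) : Decidable (Pre_maxSpending values) := by
  unfold Pre_maxSpending; infer_instance

def pvWitness_maxSpending : List (List Int) := [[8, 5, 2], [9, 4, 1], [7, 7, 0]]

def Spec_maxSpending (values : List (List Int)) (out : Int) : Prop := out = maxSpending_alt values
instance (values : List (List Int)) (out : Int) : Decidable (Spec_maxSpending values out) := by
  unfold Spec_maxSpending; infer_instance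

-- ===== CLAIM (what is proved, stated in full; the proofs are below) =====
def Claim_equal_maxSpending : Prop := ∀ (values : List (List Int)), Dom_maxSpending values →
  Pre_maxSpending values → Spec_maxSpending values (maxSpending values)

-- ===== LEMMAS AND PROOFS =====

-- the lexicographic (≤) order the heap list is sorted by
def pvTle (x y : Int × Int × Int) : Prop :=
  x.1 < y.1 ∨ (x.1 = y.1 ∧ (x.2.1 < y.2.1 ∨ (x.2.1 = y.2.1 ∧ x.2.2 ≤ y.2.2)))

-- the frontier triple of row i under pointer state p
def pvTri (values : List (List Int)) (p : List Int) (i : Nat) : Int × Int × Int :=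
  (getVal values i (p.getD i 0), (i : Int), p.getD i 0)

-- the multiset of live frontier triples (what A's heap holds) for pointer state p
def pvF (values : List (List Int)) (p : List Int) (M : Nat) : List (Int × Int × Int) :=
  (List.range M).filterMap
    (fun i => if 0 ≤ p.getD i 0 then some (pvTri values p i) else none)

-- the coupling invariant between A's heap and B's pointer array
def pvInv (values : List (List Int)) (p : List Int) (h : List (Int × Int × Int)) (M : Nat) : Prop :=
  p.length = M ∧ h.Pairwise pvTle ∧ h.Perm (pvF values p M)

lemma pvTle_refl (x : Int × Int × Int) : pvTle x x := by unfold pvTle; omega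

lemma pvTle_of_tltB_true {x y : Int × Int × Int} (h : pvTltB x y = true) : pvTle x y := by
  unfold pvTltB at h; unfold pvTle; rw [decide_eq_true_iff] at h; omega

lemma pvTle_of_tltB_false {x y : Int × Int × Int} (h : pvTltB x y = false) : pvTle y x := by
  unfold pvTltB at h; unfold pvTle; rw [decide_eq_false_iff_not] at h; omega

lemma pvTle_trans {x y z : Int × Int × Int} (h1 : pvTle x y) (h2 : pvTle y z) : pvTle x z := by
  unfold pvTle at *; omega

lemma aInsert_perm (x : Int × Int × Int) (l : List (Int × Int × Int)) :
    (aInsert x l).Perm (x :: l) := by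
  induction l with
  | nil => exact List.Perm.refl _
  | cons y ys ih =>
    by_cases h : pvTltB x y = true
    · rw [aInsert, if_pos h]
    · rw [aInsert, if_neg h]
      exact (ih.cons y).trans (List.Perm.swap x y ys)

lemma aInsert_pairwise {x : Int × Int × Int} {l : List (Int × Int × Int)}
    (hs : l.Pairwise pvTle) : (aInsert x l).Pairwise pvTle := by
  induction l with
  | nil => simp [aInsert]
  | cons y ys ih =>
    rcases List.pairwise_cons.mp hs with ⟨hy, hys⟩
    by_cases h : pvTltB x y = true
    · rw [aInsert, if_pos h]
      refine List.pairwise_cons.mpr ⟨?_, hs⟩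
      intro z hz
      rcases List.mem_cons.mp hz with hz | hz
      · subst hz; exact pvTle_of_tltB_true h
      · exact pvTle_trans (pvTle_of_tltB_true h) (hy z hz)
    · rw [aInsert, if_neg h]
      refine List.pairwise_cons.mpr ⟨?_, ih hys⟩
      intro z hz
      rcases List.mem_cons.mp ((aInsert_perm x ys).mem_iff.mp hz) with hz | hz
      · subst hz; exact pvTle_of_tltB_false (Bool.not_eq_true _ ▸ h)
      · exact hy z hz

lemma foldl_aInsert_perm {α : Type} (g : α → Int × Int × Int) (l : List α) :
    ∀ acc, (l.foldl (fun h i => aInsert (g i) h) acc).Perm (acc ++ l.map g) := by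
  induction l with
  | nil => intro acc; simp
  | cons x xs ih =>
    intro acc
    simp only [List.foldl_cons, List.map_cons]
    refine (ih _).trans ?_
    exact (List.Perm.append_right _ (aInsert_perm (g x) acc)).trans List.perm_middle.symm

lemma foldl_aInsert_pairwise {α : Type} (g : α → Int × Int × Int) (l : List α) :
    ∀ acc, acc.Pairwise pvTle → (l.foldl (fun h i => aInsert (g i) h) acc).Pairwise pvTle := by
  induction l with
  | nil => intro acc h; exact h
  | cons x xs ih =>
    intro acc h
    exact ih _ (aInsert_pairwise h)

lemma mem_pvF {values : List (List Int)} {p : List Int} {M : Nat} {x : Int × Int × Int} :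
    x ∈ pvF values p M ↔ ∃ i, i < M ∧ 0 ≤ p.getD i 0 ∧ x = pvTri values p i := by
  unfold pvF
  rw [List.mem_filterMap]
  constructor
  · rintro ⟨i, hi, hfi⟩
    rw [List.mem_range] at hi
    by_cases hact : 0 ≤ p.getD i 0
    · rw [if_pos hact] at hfi
      exact ⟨i, hi, hact, (Option.some_inj.mp hfi).symm⟩
    · rw [if_neg hact] at hfi
      exact absurd hfi (by simp)
  · rintro ⟨i, hi, hact, hx⟩
    refine ⟨i, List.mem_range.mpr hi, ?_⟩
    rw [if_pos hact, hx]

lemma bestIdx_spec (values : List (List Int)) (p : List Int) (M : Nat) :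
    (bestIdx values p (M : Int) = none ∧ ∀ i < M, ¬ (0 ≤ p.getD i 0)) ∨
    (∃ i₀ : Nat, bestIdx values p (M : Int) = some (i₀ : Int) ∧ i₀ < M ∧ 0 ≤ p.getD i₀ 0 ∧
      (∀ i < M, 0 ≤ p.getD i 0 →
        getVal values i₀ (p.getD i₀ 0) ≤ getVal values i (p.getD i 0)) ∧
      (∀ i < i₀, 0 ≤ p.getD i 0 →
        getVal values i₀ (p.getD i₀ 0) < getVal values i (p.getD i 0))) := by
  induction M with
  | zero =>
    left
    constructor
    · simp [bestIdx]
    · omega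
  | succ M ih =>
    have hsplit : PySem.List.pyRange 0 ((M : Int) + 1) 1 =
        PySem.List.pyRange 0 (M : Int) 1 ++ [(M : Int)] :=
      PySem.List.pyRange_one_succ_right (by positivity)
    have hM1 : ((M + 1 : Nat) : Int) = (M : Int) + 1 := by push_cast; ring
    have hbest : bestIdx values p ((M + 1 : Nat) : Int) =
        (fun best (i : Int) =>
          if (decide (0 ≤ PySem.List.pyGetD p i 0) &&
              (match best with
               | none => true
               | some b => decide (getVal values i (PySem.List.pyGetD p i 0) <
                                   getVal values b (PySem.List.pyGetD p b 0)))) = true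
          then some i else best) (bestIdx values p (M : Int)) (M : Int) := by
      unfold bestIdx
      rw [hM1, hsplit, List.foldl_append]
      rfl
    rcases ih with ⟨hnone, hinact⟩ | ⟨i₀, hsome, hi₀, hact, hmin, hstrict⟩
    · rw [hnone] at hbest
      simp only [PySem.List.pyGetD_natCast] at hbest
      by_cases hactM : 0 ≤ p.getD M 0
      · right
        refine ⟨M, ?_, by omega, hactM, ?_, ?_⟩
        · rw [hbest, if_pos (by simp only [Bool.and_true, decide_eq_true_eq]; exact hactM)]
        · intro i hi hia
          rcases Nat.lt_succ_iff_lt_or_eq.mp hi with hi | hi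
          · exact absurd hia (hinact i hi)
          · subst hi; exact le_refl _
        · intro i hi hia
          exact absurd hia (hinact i (by omega))
      · left
        refine ⟨?_, ?_⟩
        · rw [hbest, if_neg (by simp only [Bool.and_true, decide_eq_true_eq]; exact hactM)]
        · intro i hi
          rcases Nat.lt_succ_iff_lt_or_eq.mp hi with hi | hi
          · exact hinact i hi
          · subst hi; exact hactM
    · rw [hsome] at hbest
      simp only [PySem.List.pyGetD_natCast] at hbest
      by_cases hcond : (0 ≤ p.getD M 0 ∧
          getVal values M (p.getD M 0) < getVal values i₀ (p.getD i₀ 0))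
      · right
        refine ⟨M, ?_, by omega, hcond.1, ?_, ?_⟩
        · rw [hbest, if_pos (by simp only [Bool.and_eq_true, decide_eq_true_eq]; exact hcond)]
        · intro i hi hia
          rcases Nat.lt_succ_iff_lt_or_eq.mp hi with hi | hi
          · exact le_of_lt (lt_of_lt_of_le hcond.2 (hmin i hi hia))
          · subst hi; exact le_refl _
        · intro i hi hia
          exact lt_of_lt_of_le hcond.2 (hmin i (by omega) hia)
      · right
        refine ⟨i₀, ?_, by omega, hact, ?_, ?_⟩
        · rw [hbest, if_neg ?_]
          simp only [Bool.and_eq_true, decide_eq_true_eq]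
          rintro ⟨h1, h2⟩
          exact hcond ⟨h1, h2⟩
        · intro i hi hia
          rcases Nat.lt_succ_iff_lt_or_eq.mp hi with hi | hi
          · exact hmin i hi hia
          · subst hi
            by_contra hlt
            exact hcond ⟨hia, by omega⟩
        · exact hstrict

lemma head_spec (values : List (List Int)) (p : List Int) (M : Nat)
    (x : Int × Int × Int) (rest : List (Int × Int × Int))
    (hpw : (x :: rest).Pairwise pvTle) (hperm : (x :: rest).Perm (pvF values p M)) :
    ∃ i₀ : Nat, i₀ < M ∧ 0 ≤ p.getD i₀ 0 ∧ x = pvTri values p i₀ ∧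
      bestIdx values p (M : Int) = some (i₀ : Int) := by
  have hxmem : x ∈ pvF values p M := hperm.subset List.mem_cons_self
  rcases mem_pvF.mp hxmem with ⟨i₁, hi₁, hact₁, hx₁⟩
  have hhead : ∀ y ∈ pvF values p M, pvTle x y := by
    intro y hy
    rcases List.mem_cons.mp (hperm.mem_iff.mpr hy) with h | h
    · subst h; exact pvTle_refl _
    · exact (List.pairwise_cons.mp hpw).1 y h
  rcases bestIdx_spec values p M with ⟨_, hinact⟩ | ⟨i₀, hsome, hi₀, hact₀, hmin, hstrict⟩
  · exact absurd hact₁ (hinact i₁ hi₁)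
  · have htri₀ : pvTri values p i₀ ∈ pvF values p M := mem_pvF.mpr ⟨i₀, hi₀, hact₀, rfl⟩
    have hle : pvTle x (pvTri values p i₀) := hhead _ htri₀
    have heq : i₁ = i₀ := by
      have h1 := hmin i₁ hi₁ hact₁
      rw [hx₁] at hle
      unfold pvTle pvTri at hle
      simp only at hle
      by_cases hlt : i₁ < i₀
      · exact absurd h1 (by have := hstrict i₁ hlt hact₁; omega)
      · omega
    subst heq
    exact ⟨i₁, hi₁, hact₁, hx₁, hsome⟩

lemma pvTri_set_ne (values : List (List Int)) (p : List Int) (i₀ : Nat) (w : Int)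
    {i : Nat} (hne : i ≠ i₀) : pvTri values (p.set i₀ w) i = pvTri values p i := by
  unfold pvTri
  rw [List.getD_eq_getElem?_getD, List.getElem?_set_ne (by omega), ← List.getD_eq_getElem?_getD]

lemma pvF_set (values : List (List Int)) (p : List Int) (M i₀ : Nat)
    (hi : i₀ < M) (hlen : i₀ < p.length) (hact : 0 ≤ p.getD i₀ 0) :
    (pvF values (p.set i₀ (p.getD i₀ 0 - 1)) M).Perm
      ((if 0 ≤ p.getD i₀ 0 - 1
        then [pvTri values (p.set i₀ (p.getD i₀ 0 - 1)) i₀] else []) ++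
       ((pvF values p M).erase (pvTri values p i₀))) := by
  set j := p.getD i₀ 0 with hj
  set p' := p.set i₀ (j - 1) with hp'
  have hget' : ∀ i : Nat, i ≠ i₀ → p'.getD i 0 = p.getD i 0 := by
    intro i hne
    rw [hp', List.getD_eq_getElem?_getD, List.getElem?_set_ne (by omega),
      ← List.getD_eq_getElem?_getD]
  have hget₀ : p'.getD i₀ 0 = j - 1 := by
    rw [hp', List.getD_eq_getElem?_getD, List.getElem?_set_self hlen]; rfl
  have hrange : List.range M = List.range i₀ ++ i₀ :: ((List.range (M - i₀ - 1)).map (fun k => i₀ + (k + 1))) := by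
    have h1 : M = i₀ + (M - i₀) := by omega
    have h2 : M - i₀ = (M - i₀ - 1) + 1 := by omega
    conv_lhs => rw [h1]
    rw [List.range_add, h2, List.range_succ_eq_map]
    simp only [List.map_cons, List.map_map]
    rfl
  have hfun : ∀ (q : List Int), pvF values q M =
      (List.range i₀).filterMap (fun i => if 0 ≤ q.getD i 0 then some (pvTri values q i) else none)
      ++ (if 0 ≤ q.getD i₀ 0 then [pvTri values q i₀] else [])
      ++ ((List.range (M - i₀ - 1)).map (fun k => i₀ + (k + 1))).filterMap
          (fun i => if 0 ≤ q.getD i 0 then some (pvTri values q i) else none) := by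
    intro q
    unfold pvF
    rw [hrange, List.filterMap_append, List.filterMap_cons]
    split_ifs with h
    · simp
    · simp
  have hcongr : ∀ (l : List Nat), (∀ i ∈ l, i ≠ i₀) →
      l.filterMap (fun i => if 0 ≤ p'.getD i 0 then some (pvTri values p' i) else none) =
      l.filterMap (fun i => if 0 ≤ p.getD i 0 then some (pvTri values p i) else none) := by
    intro l hl
    apply List.filterMap_congr
    intro i hi
    rw [hget' i (hl i hi), pvTri_set_ne values p i₀ (j - 1) (hl i hi)]
  have hL : ∀ i ∈ List.range i₀, i ≠ i₀ := by intro i hi; rw [List.mem_range] at hi; omega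
  have hR : ∀ i ∈ (List.range (M - i₀ - 1)).map (fun k => i₀ + (k + 1)), i ≠ i₀ := by
    intro i hi
    rcases List.mem_map.mp hi with ⟨k, _, hk⟩
    omega
  set A := (List.range i₀).filterMap (fun i => if 0 ≤ p.getD i 0 then some (pvTri values p i) else none) with hA
  set B := ((List.range (M - i₀ - 1)).map (fun k => i₀ + (k + 1))).filterMap
      (fun i => if 0 ≤ p.getD i 0 then some (pvTri values p i) else none) with hB
  have hFp : pvF values p M = A ++ [pvTri values p i₀] ++ B := by
    rw [hfun p, if_pos hact]
  have hFp' : pvF values p' M =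
      A ++ (if 0 ≤ j - 1 then [pvTri values p' i₀] else []) ++ B := by
    rw [hfun p', hget₀, hcongr _ hL, hcongr _ hR]
  have hnotA : pvTri values p i₀ ∉ A := by
    intro hmem
    rw [hA] at hmem
    rcases List.mem_filterMap.mp hmem with ⟨i, hi, hfi⟩
    rw [List.mem_range] at hi
    by_cases h : 0 ≤ p.getD i 0
    · rw [if_pos h] at hfi
      have h2 : ((i : Int)) = (i₀ : Int) := congrArg (fun t => t.2.1) (Option.some_inj.mp hfi)
      omega
    · rw [if_neg h] at hfi
      exact absurd hfi (by simp)
  have herase : (pvF values p M).erase (pvTri values p i₀) = A ++ B := by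
    rw [hFp, List.append_assoc, List.singleton_append, List.erase_append_right _ hnotA,
      List.erase_cons_head]
  rw [hFp', herase]
  split_ifs with h
  · rw [List.append_assoc, List.singleton_append, List.singleton_append]
    exact List.perm_middle
  · simp

-- one round: the two loop bodies stay coupled and add the same amount
lemma step_once (values : List (List Int)) (p : List Int) (h : List (Int × Int × Int))
    (ans d : Int) (hinv : pvInv values p h values.length) :
    pvInv values (bStep values (values.length : Int) (p, ans) d).1
      (aStep values (h, ans) d).1 values.length ∧
    (aStep values (h, ans) d).2 = (bStep values (values.length : Int) (p, ans) d).2 := by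
  rcases hinv with ⟨hlen, hpw, hperm⟩
  cases h with
  | nil =>
    have hFnil : pvF values p values.length = [] := hperm.nil_eq.symm ▸ rfl
    have hnone : bestIdx values p (values.length : Int) = none := by
      rcases bestIdx_spec values p values.length with ⟨hn, _⟩ | ⟨i₀, hsome, hi₀, hact, _, _⟩
      · exact hn
      · have : pvTri values p i₀ ∈ pvF values p values.length := mem_pvF.mpr ⟨i₀, hi₀, hact, rfl⟩
        rw [hFnil] at this
        exact absurd this (List.not_mem_nil)
    constructor
    · simp only [aStep, bStep, hnone]
      exact ⟨hlen, hpw, hperm⟩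
    · simp only [aStep, bStep, hnone]
  | cons x rest =>
    rcases head_spec values p values.length x rest hpw hperm with ⟨i₀, hi₀, hact, hx, hbest⟩
    have hlen₀ : i₀ < p.length := by omega
    have hrest : rest.Perm ((pvF values p values.length).erase (pvTri values p i₀)) := by
      have := hperm.erase x
      rw [List.erase_cons_head] at this
      rw [hx] at this
      exact this
    have hFset := pvF_set values p values.length i₀ hi₀ hlen₀ hact
    have hA : aStep values (x :: rest, ans) d =
        (if p.getD i₀ 0 > 0
         then aInsert (getVal values i₀ (p.getD i₀ 0 - 1), (i₀ : Int), p.getD i₀ 0 - 1) rest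
         else rest,
         ans + d * getVal values i₀ (p.getD i₀ 0)) := by
      rw [hx]; rfl
    have hB : bStep values (values.length : Int) (p, ans) d =
        (p.set i₀ (p.getD i₀ 0 - 1), ans + d * getVal values i₀ (p.getD i₀ 0)) := by
      simp only [bStep, hbest, PySem.List.pyGetD_natCast, PySem.List.pySetD_natCast]
    refine ⟨⟨?_, ?_, ?_⟩, ?_⟩
    · rw [hB]; simp [hlen]
    · rw [hA]
      split_ifs with hjpos
      · exact aInsert_pairwise (List.pairwise_cons.mp hpw).2
      · exact (List.pairwise_cons.mp hpw).2
    · rw [hA, hB]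
      have hget₀' : (p.set i₀ (p.getD i₀ 0 - 1)).getD i₀ 0 = p.getD i₀ 0 - 1 := by
        rw [List.getD_eq_getElem?_getD, List.getElem?_set_self hlen₀]; rfl
      have htri' : pvTri values (p.set i₀ (p.getD i₀ 0 - 1)) i₀ =
          (getVal values i₀ (p.getD i₀ 0 - 1), (i₀ : Int), p.getD i₀ 0 - 1) := by
        unfold pvTri; rw [hget₀']
      split_ifs with hjpos
      · rw [if_pos (by omega : (0:Int) ≤ p.getD i₀ 0 - 1), htri', List.singleton_append] at hFset
        exact (aInsert_perm _ rest).trans ((List.Perm.cons _ hrest).trans hFset.symm)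
      · rw [if_neg (by omega : ¬ (0:Int) ≤ p.getD i₀ 0 - 1), List.nil_append] at hFset
        exact hrest.trans hFset.symm
    · rw [hA, hB]

-- the whole loop: coupled states produce the same running total for any multiplier list
lemma fold_eq (values : List (List Int)) (ds : List Int) :
    ∀ (p : List Int) (h : List (Int × Int × Int)) (ans : Int),
      pvInv values p h values.length →
      (ds.foldl (aStep values) (h, ans)).2 =
      (ds.foldl (bStep values (values.length : Int)) (p, ans)).2 := by
  induction ds with
  | nil => intro p h ans _; rfl
  | cons d ds ih =>
    intro p h ans hinv
    rcases step_once values p h ans d hinv with ⟨hinv', hans⟩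
    simp only [List.foldl_cons]
    have hA : aStep values (h, ans) d = ((aStep values (h, ans) d).1, (aStep values (h, ans) d).2) := rfl
    have hB : bStep values (values.length : Int) (p, ans) d =
        ((bStep values (values.length : Int) (p, ans) d).1,
         (bStep values (values.length : Int) (p, ans) d).2) := rfl
    rw [hA, hB, hans]
    exact ih _ _ _ hinv'

-- ===== VERDICT (by name: the statement is the Claim_ definition above) =====
theorem maxSpending_spec : Claim_equal_maxSpending := by
  intro values _ hpre
  unfold Spec_maxSpending
  rcases hpre with ⟨hne, hn, _⟩
  unfold maxSpending maxSpending_alt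
  simp only
  set M := values.length with hM
  set n : Int := (((PySem.List.pyGet? values 0).getD []).length : Int) with hndef
  have hrow0 : (PySem.List.pyGet? values 0).getD [] = values.headD [] := by
    cases values with
    | nil => exact absurd rfl hne
    | cons r rs => simp [pysem]
  have hn1 : 1 ≤ n := by
    rw [hndef, hrow0]
    exact_mod_cast hn
  have hp₀ : PySem.List.pyRepeat [n - 1] (M : Int) = List.replicate M (n - 1) := by
    rw [PySem.List.pyRepeat_singleton]; norm_num
  have hgetD₀ : ∀ i : Nat, i < M → (List.replicate M (n - 1)).getD i 0 = n - 1 := by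
    intro i hi
    rw [List.getD_eq_getElem?_getD, List.getElem?_replicate, if_pos hi]; rfl
  have hinit : pvInv values (List.replicate M (n - 1))
      ((PySem.List.pyRange 0 (M : Int) 1).foldl
        (fun h i => aInsert (getVal values i (n - 1), i, n - 1) h) []) M := by
    refine ⟨by simp, ?_, ?_⟩
    · rw [PySem.List.pyRange_zero_nat, List.foldl_map]
      exact foldl_aInsert_pairwise (fun k : Nat => (getVal values k (n - 1), (k : Int), n - 1))
        (List.range M) [] List.Pairwise.nil
    · rw [PySem.List.pyRange_zero_nat, List.foldl_map]
      refine (foldl_aInsert_perm (fun k : Nat => (getVal values k (n - 1), (k : Int), n - 1))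
        (List.range M) []).trans ?_
      rw [List.nil_append]
      have : pvF values (List.replicate M (n - 1)) M =
          (List.range M).map (fun k : Nat => (getVal values k (n - 1), (k : Int), n - 1)) := by
        unfold pvF
        rw [List.filterMap_eq_map_iff_forall_eq_some.mpr ?_]
        intro i hi
        rw [List.mem_range] at hi
        rw [hgetD₀ i hi, if_pos (by omega)]
        unfold pvTri
        rw [hgetD₀ i hi]
      rw [this]
  rw [hp₀]
  exact fold_eq values _ _ _ 0 hinit
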